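-- pv_equiv track=rewrite | github.com/gjhami/LinkSiren | src/linksiren/__main__.py | filter_targets
-- ===== SOURCE A (Python) =====
-- def filter_targets(targets, sorted_rankings, max_folders_per_target):
--     """
--     filter_targets(targets, sorted_rankings, max_folders_per_target)
--
--     :param list targets: List of UNC paths to shares and base directories to review.
--     :param dict sorted_rankings: A dictionary in the format {<folder UNC path>: <ranking>} sorted
--     by ranking.
--     :param int max_folders_per_target: Number of deployment targets to output per supplied
--     target share or folder.
--
--     :return: A list of UNC paths for payload deployemnt. This contains at most
--     max_folders_per_target deployment targets for each supplied target share or folder.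
--
--     Accepts a list of target shares or folders supplied by the user, a dictionary sorted by ranking
--     of each potential deployment target and its ranking, and a maximum number of deployment targets
--     per supplied target. Returns a list of deployment targets.
--     """
--     filtered_rankings = []
--
--     # For each share target in the list
--     for share in targets:
--         # Filter the dictionary to only include keys that begin with the share target
--         matching_share_paths = [key for key in sorted_rankings.keys() if share == key or f'{share}\\' == key[:len(share)+1]]
--
--         # Sort the matching share paths based on their ranking and keep only the top N
--         top_matching_share_paths = sorted(matching_share_paths,
--                                         key=lambda key: sorted_rankings[key], reverse=True)[:max_folders_per_target]
--
--         # Update the sorted_rankings dictionary with the top N matching share paths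
--         filtered_rankings.extend(top_matching_share_paths)
--
--     return filtered_rankings
-- ===== SOURCE B (Python) =====
-- def filter_targets(targets, sorted_rankings, max_folders_per_target):
--     # Inverted index: one pass over the ranking keys fills a bucket per target,
--     # instead of scanning all keys once per target.
--     buckets = {t: [] for t in targets}
--     for key in sorted_rankings:
--         # candidate targets for this key: every prefix of key that ends just
--         # before a '\', plus key itself
--         for i, ch in enumerate(key):
--             if ch == '\\':
--                 p = key[:i]
--                 if p in buckets:
--                     buckets[p].append(key)
--         if key in buckets:
--             buckets[key].append(key)
--     out = []
--     for t in targets: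
--         top = sorted(buckets[t], key=lambda k: sorted_rankings[k], reverse=True)
--         out.extend(top[:max_folders_per_target])
--     return out
-- ===== Notes on version B (the rewrite author's own statement) =====
-- stated objective: faster
-- what changed: Replaces the per-target scan of all ranking keys by a single pass over the keys that distributes each key into a bucket keyed by its candidate prefixes (prefixes cut at each backslash), then sorts and truncates each bucket.
import Mathlib
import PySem

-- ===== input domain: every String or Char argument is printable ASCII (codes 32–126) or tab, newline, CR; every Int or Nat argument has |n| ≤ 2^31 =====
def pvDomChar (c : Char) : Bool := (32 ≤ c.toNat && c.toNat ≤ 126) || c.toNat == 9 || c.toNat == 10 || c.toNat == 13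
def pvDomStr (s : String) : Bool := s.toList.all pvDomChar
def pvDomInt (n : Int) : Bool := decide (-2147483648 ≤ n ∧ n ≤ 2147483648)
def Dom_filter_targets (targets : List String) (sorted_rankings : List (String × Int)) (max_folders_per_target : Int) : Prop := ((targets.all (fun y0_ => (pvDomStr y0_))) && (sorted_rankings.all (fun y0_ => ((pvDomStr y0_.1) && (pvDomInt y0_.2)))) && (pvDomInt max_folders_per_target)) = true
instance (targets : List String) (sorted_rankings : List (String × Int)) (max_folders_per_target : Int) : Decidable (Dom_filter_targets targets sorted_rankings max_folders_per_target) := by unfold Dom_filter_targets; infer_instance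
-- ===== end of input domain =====

-- B replaces A's per-target scan of all ranking keys by a single pass over the keys that
-- distributes each key into per-target buckets via its backslash-cut prefixes.


-- ===== PORT A =====
def filter_targets (targets : List String) (sorted_rankings : List (String × Int)) (max_folders_per_target : Int) : List String :=
  let d := PySem.Dict.ofList sorted_rankings
  targets.foldl (fun acc share =>
    let matching := (PySem.Dict.keys d).filter (fun key =>
      share == key ||
        (share.toList ++ ['\\']) == PySem.List.slice key.toList none (some ((share.toList.length : Int) + 1)))
    acc ++ PySem.List.slice (PySem.List.sorted matching (fun key => d.getD key 0) true)
            none (some max_folders_per_target)) []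

-- ===== PORT B =====
-- B's inner loop: the candidate prefixes of a key — key[:i] for every i with key[i] = '\', then key itself
def pvCands (pre : List Char) : List Char → List (List Char)
  | [] => [pre]
  | c :: cs => (if c = '\\' then [pre] else []) ++ pvCands (pre ++ [c]) cs

def filter_targets_alt (targets : List String) (sorted_rankings : List (String × Int)) (max_folders_per_target : Int) : List String :=
  let d := PySem.Dict.ofList sorted_rankings
  let buckets0 : PySem.Dict String (List String) :=
    targets.foldl (fun b t => b.insert t []) PySem.Dict.empty
  let buckets := (PySem.Dict.keys d).foldl (fun b key =>
    (pvCands [] key.toList).foldl (fun b p =>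
      let ps := String.ofList p
      if b.contains ps then b.modify ps [] (fun l => l ++ [key]) else b) b) buckets0
  targets.foldl (fun acc t =>
    acc ++ PySem.List.slice (PySem.List.sorted (buckets.getD t []) (fun k => d.getD k 0) true)
            none (some max_folders_per_target)) []

-- ===== PRECONDITION & SPEC =====
def Spec_filter_targets (targets : List String) (sorted_rankings : List (String × Int)) (max_folders_per_target : Int) (out : List String) : Prop := out = filter_targets_alt targets sorted_rankings max_folders_per_target
instance (targets : List String) (sorted_rankings : List (String × Int)) (max_folders_per_target : Int) (out : List String) : Decidable (Spec_filter_targets targets sorted_rankings max_folders_per_target out) := by unfold Spec_filter_targets; infer_instance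

-- ===== CLAIM (what is proved, stated in full; the proofs are below) =====
def Claim_equal_filter_targets : Prop := ∀ (targets : List String) (sorted_rankings : List (String × Int)) (max_folders_per_target : Int), Dom_filter_targets targets sorted_rankings max_folders_per_target → Spec_filter_targets targets sorted_rankings max_folders_per_target (filter_targets targets sorted_rankings max_folders_per_target)

-- ===== LEMMAS AND PROOFS =====

-- A's match predicate for one target (definitionally the filter body of port A)
def pvMatch (share key : String) : Bool :=
  share == key ||
    (share.toList ++ ['\\']) == PySem.List.slice key.toList none (some ((share.toList.length : Int) + 1))

-- membership in pvCands: exactly the words extending pre whose next character after x is '\', plus the whole word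
theorem mem_pvCands (rest : List Char) : ∀ (pre x : List Char),
    x ∈ pvCands pre rest ↔ x = pre ++ rest ∨ (pre <+: x ∧ x ++ ['\\'] <+: pre ++ rest) := by
  induction rest with
  | nil =>
    intro pre x
    simp only [pvCands, List.mem_singleton, List.append_nil]
    constructor
    · intro h; exact Or.inl h
    · rintro (h | ⟨hp, hs⟩)
      · exact h
      · exfalso
        have h1 := hp.length_le
        have h2 := hs.length_le
        simp at h2; omega
  | cons c cs ih =>
    intro pre x
    simp only [pvCands, List.mem_append]
    constructor
    · rintro (h | h)
      · split_ifs at h with hc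
        · simp at h; subst h; subst hc
          exact Or.inr ⟨List.prefix_refl _, by simp⟩
        · simp at h
      · rcases (ih (pre ++ [c]) x).mp h with h | ⟨hp, hs⟩
        · left; simp [h]
        · right
          exact ⟨(List.prefix_append pre [c]).trans hp, by simpa using hs⟩
    · rintro (h | ⟨hp, hs⟩)
      · right; apply (ih (pre ++ [c]) x).mpr; left; simp [h]
      · obtain ⟨y, rfl⟩ := hp
        rcases y with _ | ⟨c', y'⟩
        · left
          have : pre ++ ['\\'] <+: pre ++ c :: cs := by simpa using hs
          have h2 : ['\\'] <+: c :: cs := (List.prefix_append_right_inj pre).mp this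
          obtain ⟨z, hz⟩ := h2
          simp at hz
          simp [if_pos hz.1.symm]
        · have : pre ++ (c' :: (y' ++ ['\\'])) <+: pre ++ c :: cs := by simpa using hs
          have h2 : c' :: (y' ++ ['\\']) <+: c :: cs := (List.prefix_append_right_inj pre).mp this
          obtain ⟨z, hz⟩ := h2
          simp at hz
          obtain ⟨h1, hz2⟩ := hz
          subst h1
          right
          apply (ih (pre ++ [c']) _).mpr
          right
          refine ⟨by simp, ⟨z, ?_⟩⟩
          simp [← hz2]

theorem length_le_of_mem_pvCands (rest : List Char) : ∀ (pre x : List Char),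
    x ∈ pvCands pre rest → pre.length ≤ x.length := by
  intro pre x h
  rcases (mem_pvCands rest pre x).mp h with h | ⟨hp, _⟩
  · simp [h]
  · exact hp.length_le

theorem nodup_pvCands (rest : List Char) : ∀ (pre : List Char), (pvCands pre rest).Nodup := by
  induction rest with
  | nil => intro pre; simp [pvCands]
  | cons c cs ih =>
    intro pre
    simp only [pvCands]
    split_ifs with hc
    · refine List.Nodup.cons ?_ (ih _)
      intro hmem
      have := length_le_of_mem_pvCands cs (pre ++ [c]) pre hmem
      simp at this
    · simpa using ih (pre ++ [c])

-- B's candidate test coincides with A's match predicate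
theorem pvMatch_iff_mem_cands (share key : String) :
    pvMatch share key = true ↔ share.toList ∈ pvCands [] key.toList := by
  rw [mem_pvCands]
  have hs : PySem.List.slice key.toList none (some ((share.toList.length : Int) + 1))
      = key.toList.take (share.toList.length + 1) := by
    have : ((share.toList.length : Int) + 1) = ((share.toList.length + 1 : Nat) : Int) := by push_cast; ring
    rw [this, PySem.List.slice_to_natCast]
  simp only [pvMatch, Bool.or_eq_true, beq_iff_eq, hs, List.nil_append, List.nil_prefix, true_and]
  constructor
  · rintro (h | h)
    · left; exact congrArg String.toList h ▸ rfl
    · right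
      rw [List.prefix_iff_eq_take]
      simp [h]
  · rintro (h | h)
    · left; exact String.toList_inj.mp h
    · right
      rw [List.prefix_iff_eq_take] at h
      simpa using h

-- the candidate fold of B never adds or removes a bucket
theorem contains_candFold (key t : String) : ∀ (ps : List (List Char)) (b : PySem.Dict String (List String)),
    (ps.foldl (fun b p =>
      let pstr := String.ofList p
      if b.contains pstr then b.modify pstr [] (fun l => l ++ [key]) else b) b).contains t = b.contains t := by
  intro ps
  induction ps with
  | nil => intro b; rfl
  | cons p ps ih =>
    intro b
    rw [List.foldl_cons, ih]
    by_cases hb : b.contains (String.ofList p)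
    · simp only [hb, if_pos]
      rw [PySem.Dict.contains_modify]
      by_cases ht : t = String.ofList p
      · subst ht; simp [hb]
      · simp [beq_eq_false_iff_ne.mpr ht]
    · simp [hb]

-- the candidate fold appends key to bucket t exactly when t is a candidate
theorem getD_candFold (key t : String) : ∀ (ps : List (List Char)), ps.Nodup →
    ∀ (b : PySem.Dict String (List String)), b.contains t = true →
    (ps.foldl (fun b p =>
      let pstr := String.ofList p
      if b.contains pstr then b.modify pstr [] (fun l => l ++ [key]) else b) b).getD t []
      = b.getD t [] ++ (if t.toList ∈ ps then [key] else []) := by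
  intro ps
  induction ps with
  | nil => intro _ b _; simp
  | cons p ps ih =>
    intro hnd b hb
    obtain ⟨hnotin, hnd'⟩ := List.nodup_cons.mp hnd
    rw [List.foldl_cons]
    by_cases hp : p = t.toList
    · subst hp
      have hps : String.ofList t.toList = t := String.ofList_toList
      simp only [hps, hb, if_pos]
      rw [ih hnd' _ (by rw [PySem.Dict.contains_modify]; simp)]
      rw [PySem.Dict.getD_modify_self]
      have : t.toList ∉ ps := hnotin
      simp [this]
    · have hne : t ≠ String.ofList p := by
        intro h; apply hp; rw [h]; exact String.toList_ofList.symm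
      have hp' : t.toList ≠ p := fun h => hp h.symm
      by_cases hc : b.contains (String.ofList p)
      · simp only [hc, if_pos]
        rw [ih hnd' _ (by rw [PySem.Dict.contains_modify]; simp [hb])]
        rw [PySem.Dict.getD_modify_of_ne _ _ _ hne]
        simp [List.mem_cons, hp']
      · simp only [hc]
        rw [if_neg (by simp), ih hnd' _ hb]
        simp [List.mem_cons, hp']

-- the outer key fold of B fills bucket t with exactly A's filtered key list
theorem getD_keyFold (t : String) : ∀ (keys : List String) (b : PySem.Dict String (List String)),
    b.contains t = true →
    (keys.foldl (fun b key =>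
      (pvCands [] key.toList).foldl (fun b p =>
        let pstr := String.ofList p
        if b.contains pstr then b.modify pstr [] (fun l => l ++ [key]) else b) b) b).getD t []
      = b.getD t [] ++ keys.filter (fun key => pvMatch t key) := by
  intro keys
  induction keys with
  | nil => intro b _; simp
  | cons key keys ih =>
    intro b hb
    rw [List.foldl_cons]
    rw [ih _ (by rw [contains_candFold]; exact hb)]
    rw [getD_candFold key t _ (nodup_pvCands _ _) b hb]
    rw [List.filter_cons]
    by_cases hm : pvMatch t key = true
    · rw [if_pos ((pvMatch_iff_mem_cands t key).mp hm)]
      simp [hm]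
    · rw [if_neg (fun h => hm ((pvMatch_iff_mem_cands t key).mpr h))]
      simp [hm]

theorem containsTrue_insertFold (t : String) : ∀ (targets : List String) (b : PySem.Dict String (List String)),
    b.contains t = true → (targets.foldl (fun b s => b.insert s ([] : List String)) b).contains t = true := by
  intro targets
  induction targets with
  | nil => intro b hb; exact hb
  | cons s ss ih =>
    intro b hb
    rw [List.foldl_cons]
    exact ih _ (by rw [PySem.Dict.contains_insert]; simp [hb])

theorem contains_insertFold (t : String) : ∀ (targets : List String) (b : PySem.Dict String (List String)),
    t ∈ targets → (targets.foldl (fun b s => b.insert s ([] : List String)) b).contains t = true := by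
  intro targets
  induction targets with
  | nil => intro b h; simp at h
  | cons s ss ih =>
    intro b h
    rw [List.foldl_cons]
    by_cases hs : t ∈ ss
    · exact ih _ hs
    · have ht : t = s := by
        rcases List.mem_cons.mp h with h | h
        · exact h
        · exact absurd h hs
      subst ht
      exact containsTrue_insertFold t ss _ (by rw [PySem.Dict.contains_insert]; simp)

theorem getD_insertFold (t : String) : ∀ (targets : List String) (b : PySem.Dict String (List String)),
    b.getD t [] = [] → (targets.foldl (fun b s => b.insert s ([] : List String)) b).getD t [] = [] := by
  intro targets
  induction targets with
  | nil => intro b hb; exact hb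
  | cons s ss ih =>
    intro b hb
    rw [List.foldl_cons]
    apply ih
    by_cases ht : t = s
    · subst ht; rw [PySem.Dict.getD_insert_self]
    · rw [PySem.Dict.getD_insert_of_ne _ _ _ ht]; exact hb

theorem filter_targets_main_eq (targets : List String) (sorted_rankings : List (String × Int)) (m : Int) :
    filter_targets targets sorted_rankings m = filter_targets_alt targets sorted_rankings m := by
  simp only [filter_targets, filter_targets_alt]
  rw [PySem.List.foldl_append_eq_flatMap, PySem.List.foldl_append_eq_flatMap]
  congr 1
  apply List.flatMap_congr
  intro share hmem
  have hb : ((PySem.Dict.keys (PySem.Dict.ofList sorted_rankings)).foldl (fun b key =>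
      (pvCands [] key.toList).foldl (fun b p =>
        let ps := String.ofList p
        if b.contains ps then b.modify ps [] (fun l => l ++ [key]) else b) b)
      (targets.foldl (fun b t => b.insert t []) PySem.Dict.empty)).getD share []
      = (PySem.Dict.keys (PySem.Dict.ofList sorted_rankings)).filter (fun key => pvMatch share key) := by
    rw [getD_keyFold share _ _ (contains_insertFold share targets _ hmem)]
    rw [getD_insertFold share targets _ (by rfl)]
    simp
  rw [hb]
  rfl

-- ===== VERDICT (by name: the statement is the Claim_ definition above) =====
theorem filter_targets_spec : Claim_equal_filter_targets := by
  intro targets sorted_rankings m _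
  unfold Spec_filter_targets
  exact filter_targets_main_eq targets sorted_rankings m
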